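-- pv_equiv track=rewrite | github.com/pratik387/intraday-trade-assistant | tools/analyze_all_exit_scenarios.py | classify_trade_pattern
-- ===== SOURCE A (Python) =====
-- def classify_trade_pattern(trade):
--     """
--     Classify trade into one of 4 patterns:
--     1. sl_only: SL hit before any targets
--     2. t1_then_sl: T1 hit, then SL
--     3. t2_then_sl: T2 hit, then SL (reversal)
--     4. t3_or_better: T3 hit or better exit
--     """
--     exit_sequence = trade['exit_sequence']
--
--     has_t1 = any('t1' in exit.lower() for exit in exit_sequence)
--     has_t2 = any('t2' in exit.lower() for exit in exit_sequence)
--     has_sl = any('sl' in exit.lower() for exit in exit_sequence)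
--
--     if has_t2:
--         # Check if SL came after T2
--         t2_index = next(i for i, exit in enumerate(exit_sequence) if 't2' in exit.lower())
--         sl_after_t2 = any('sl' in exit_sequence[i].lower() for i in range(t2_index + 1, len(exit_sequence)))
--
--         if sl_after_t2:
--             return 't2_then_sl'
--         else:
--             return 't3_or_better'
--
--     elif has_t1:
--         # Check if SL came after T1
--         t1_index = next(i for i, exit in enumerate(exit_sequence) if 't1' in exit.lower())
--         sl_after_t1 = any('sl' in exit_sequence[i].lower() for i in range(t1_index + 1, len(exit_sequence)))
--
--         if sl_after_t1:
--             return 't1_then_sl'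
--         else:
--             # T1 hit but no SL after (maybe EOD or other exit)
--             return 't1_then_other'
--
--     elif has_sl:
--         return 'sl_only'
--
--     else:
--         # No clear pattern (maybe EOD, time stop, etc.)
--         return 'other'
-- ===== SOURCE B (Python) =====
-- def classify_trade_pattern(trade):
--     """Single-pass classifier: record first t1/t2 index and last sl index, then branch."""
--     exit_sequence = trade['exit_sequence']
--     first_t1 = None
--     first_t2 = None
--     last_sl = -1
--     for i, e in enumerate(exit_sequence):
--         low = e.lower()
--         if first_t1 is None and 't1' in low:
--             first_t1 = i
--         if first_t2 is None and 't2' in low: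
--             first_t2 = i
--         if 'sl' in low:
--             last_sl = i
--     if first_t2 is not None:
--         return 't2_then_sl' if last_sl > first_t2 else 't3_or_better'
--     if first_t1 is not None:
--         return 't1_then_sl' if last_sl > first_t1 else 't1_then_other'
--     if last_sl >= 0:
--         return 'sl_only'
--     return 'other'
-- ===== Notes on version B (the rewrite author's own statement) =====
-- stated objective: faster
-- what changed: Replaces A's three separate any-scans plus a nested suffix re-scan with a single indexed pass that records the first t1/t2 index and the last sl index, then branches on those indices.
import Mathlib
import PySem

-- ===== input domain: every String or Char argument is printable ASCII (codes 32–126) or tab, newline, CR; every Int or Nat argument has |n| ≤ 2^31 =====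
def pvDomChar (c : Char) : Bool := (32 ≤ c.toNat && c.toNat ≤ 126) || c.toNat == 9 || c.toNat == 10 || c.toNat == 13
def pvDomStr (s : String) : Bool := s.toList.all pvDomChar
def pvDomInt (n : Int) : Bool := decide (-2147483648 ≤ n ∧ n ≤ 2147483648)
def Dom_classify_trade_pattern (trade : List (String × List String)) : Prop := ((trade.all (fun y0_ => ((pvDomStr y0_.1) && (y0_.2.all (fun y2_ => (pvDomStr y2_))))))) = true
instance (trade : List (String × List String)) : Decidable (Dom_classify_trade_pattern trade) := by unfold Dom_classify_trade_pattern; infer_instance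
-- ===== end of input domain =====

-- B replaces A's three any-scans plus nested suffix re-scan by one indexed pass recording
-- the first t1/t2 indices and the last sl index (measured faster by a constant factor).


-- shared helper: trade['exit_sequence'] (first-match association-list lookup; [] only outside Pre_)
def pvExitSeq (trade : List (String × List String)) : List String :=
  (List.lookup "exit_sequence" trade).getD []

-- 'needle in e.lower()'
def pvHas (needle e : String) : Bool := PySem.Str.isIn needle (PySem.Str.lower e)

-- ===== PORT A =====
def classify_trade_pattern (trade : List (String × List String)) : String :=
  let exit_sequence := pvExitSeq trade
  let has_t1 := exit_sequence.any (pvHas "t1")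
  let has_t2 := exit_sequence.any (pvHas "t2")
  let has_sl := exit_sequence.any (pvHas "sl")
  if has_t2 then
    -- next(i for i, exit in enumerate(...) if 't2' in exit.lower()): first matching index (exists, has_t2 guards)
    let t2_index := exit_sequence.findIdx (pvHas "t2")
    -- any('sl' in exit_sequence[i].lower() for i in range(t2_index+1, len(...))): scan of the suffix
    let sl_after_t2 := (exit_sequence.drop (t2_index + 1)).any (pvHas "sl")
    if sl_after_t2 then "t2_then_sl" else "t3_or_better"
  else if has_t1 then
    let t1_index := exit_sequence.findIdx (pvHas "t1")
    let sl_after_t1 := (exit_sequence.drop (t1_index + 1)).any (pvHas "sl")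
    if sl_after_t1 then "t1_then_sl" else "t1_then_other"
  else if has_sl then "sl_only"
  else "other"

-- ===== PORT B =====
-- one step of B's loop body: update (first_t1, first_t2, last_sl)
def pvStep (st : Option Int × Option Int × Int) (p : Int × String) : Option Int × Option Int × Int :=
  let low := PySem.Str.lower p.2
  ( (if st.1.isNone && PySem.Str.isIn "t1" low then some p.1 else st.1),
    (if st.2.1.isNone && PySem.Str.isIn "t2" low then some p.1 else st.2.1),
    (if PySem.Str.isIn "sl" low then p.1 else st.2.2) )

def classify_trade_pattern_alt (trade : List (String × List String)) : String :=
  let exit_sequence := pvExitSeq trade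
  let st := (PySem.List.enumerate exit_sequence 0).foldl pvStep
              ((none : Option Int), (none : Option Int), (-1 : Int))
  match st.2.1 with
  | some i => if st.2.2 > i then "t2_then_sl" else "t3_or_better"
  | none =>
    match st.1 with
    | some i => if st.2.2 > i then "t1_then_sl" else "t1_then_other"
    | none => if st.2.2 ≥ 0 then "sl_only" else "other"

-- ===== PRECONDITION & SPEC =====
-- Pre_ excludes exactly the trades without an 'exit_sequence' key, on which A (and B) raise KeyError.
def Pre_classify_trade_pattern (trade : List (String × List String)) : Prop :=
  (List.lookup "exit_sequence" trade).isSome = true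
instance (trade : List (String × List String)) : Decidable (Pre_classify_trade_pattern trade) := by
  unfold Pre_classify_trade_pattern; infer_instance

def pvWitness_classify_trade_pattern : (List (String × List String)) :=
  [("exit_sequence", ["t1-hit", "SL"])]

def Spec_classify_trade_pattern (trade : List (String × List String)) (out : String) : Prop := out = classify_trade_pattern_alt trade
instance (trade : List (String × List String)) (out : String) : Decidable (Spec_classify_trade_pattern trade out) := by unfold Spec_classify_trade_pattern; infer_instance

-- ===== CLAIM (what is proved, stated in full; the proofs are below) =====
def Claim_equal_classify_trade_pattern : Prop := ∀ (trade : List (String × List String)), Dom_classify_trade_pattern trade → Pre_classify_trade_pattern trade → Spec_classify_trade_pattern trade (classify_trade_pattern trade)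

-- ===== LEMMAS AND PROOFS =====

-- third component of B's loop, in isolation
def lastSlAux (xs : List String) (s acc : Int) : Int :=
  match xs with
  | [] => acc
  | x :: xs => lastSlAux xs (s + 1) (if pvHas "sl" x then s else acc)

theorem fold_fst (xs : List String) : ∀ (s : Int) (st : Option Int × Option Int × Int),
    ((PySem.List.enumerate xs s).foldl pvStep st).1 =
      (match st.1 with
       | some v => some v
       | none => if xs.any (pvHas "t1") then some (s + xs.findIdx (pvHas "t1")) else none) := by
  induction xs with
  | nil => intro s st; cases h : st.1 <;> simp [PySem.List.enumerate_nil, h]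
  | cons x xs ih =>
    intro s st
    rw [PySem.List.enumerate_cons, List.foldl_cons, ih]
    cases h : st.1 with
    | some v => simp [pvStep, h]
    | none =>
      by_cases hx : pvHas "t1" x
      · simp [pvStep, h, pvHas] at hx ⊢
        simp [hx, List.findIdx_cons, pvHas]
      · simp [pvStep, h, pvHas] at hx ⊢
        simp [hx, List.findIdx_cons, pvHas]
        split_ifs
        · congr 1; ring
        · rfl

theorem fold_snd (xs : List String) : ∀ (s : Int) (st : Option Int × Option Int × Int),
    ((PySem.List.enumerate xs s).foldl pvStep st).2.1 =
      (match st.2.1 with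
       | some v => some v
       | none => if xs.any (pvHas "t2") then some (s + xs.findIdx (pvHas "t2")) else none) := by
  induction xs with
  | nil => intro s st; cases h : st.2.1 <;> simp [PySem.List.enumerate_nil, h]
  | cons x xs ih =>
    intro s st
    rw [PySem.List.enumerate_cons, List.foldl_cons, ih]
    cases h : st.2.1 with
    | some v => simp [pvStep, h]
    | none =>
      by_cases hx : pvHas "t2" x
      · simp [pvStep, h, pvHas] at hx ⊢
        simp [hx, List.findIdx_cons, pvHas]
      · simp [pvStep, h, pvHas] at hx ⊢
        simp [hx, List.findIdx_cons, pvHas]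
        split_ifs
        · congr 1; ring
        · rfl

theorem fold_thd (xs : List String) : ∀ (s : Int) (st : Option Int × Option Int × Int),
    ((PySem.List.enumerate xs s).foldl pvStep st).2.2 = lastSlAux xs s st.2.2 := by
  induction xs with
  | nil => intro s st; simp [PySem.List.enumerate_nil, lastSlAux]
  | cons x xs ih =>
    intro s st
    rw [PySem.List.enumerate_cons, List.foldl_cons, ih]
    by_cases hx : pvHas "sl" x <;> simp [pvHas] at hx <;> simp [pvStep, pvHas, lastSlAux, hx]

theorem lastSlAux_lb (xs : List String) : ∀ (s acc : Int), acc ≤ s → acc ≤ lastSlAux xs s acc := by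
  induction xs with
  | nil => intro s acc h; simp [lastSlAux]
  | cons x xs ih =>
    intro s acc h
    simp only [lastSlAux]
    split_ifs with hx
    · exact le_trans h (ih (s+1) s (by omega))
    · exact ih (s+1) acc (by omega)

theorem lastSlAux_cases (xs : List String) : ∀ (s acc : Int),
    lastSlAux xs s acc = acc ∨ lastSlAux xs s acc ≥ s := by
  induction xs with
  | nil => intro s acc; simp [lastSlAux]
  | cons x xs ih =>
    intro s acc
    simp only [lastSlAux]
    split_ifs with hx
    · rcases ih (s+1) s with h | h <;> omega
    · rcases ih (s+1) acc with h | h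
      · exact Or.inl h
      · exact Or.inr (by omega)

theorem lastSlAux_ge_iff (xs : List String) : ∀ (i : Nat) (s acc : Int), acc < s →
    (lastSlAux xs s acc ≥ s + i ↔ (xs.drop i).any (pvHas "sl") = true) := by
  induction xs with
  | nil => intro i s acc h; simp [lastSlAux]; omega
  | cons x xs ih =>
    intro i s acc h
    cases i with
    | zero =>
      simp only [lastSlAux, List.drop_zero, List.any_cons, Nat.cast_zero, add_zero]
      by_cases hx : pvHas "sl" x
      · simp [hx]
        exact lastSlAux_lb xs (s+1) s (by omega)
      · simp [hx]
        have h1 := ih 0 (s+1) acc (by omega)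
        simp at h1
        rw [← h1]
        rcases lastSlAux_cases xs (s+1) acc with hc | hc <;> omega
    | succ i =>
      simp only [lastSlAux, List.drop_succ_cons]
      have h1 := ih i (s+1) (if pvHas "sl" x then s else acc) (by split_ifs <;> omega)
      rw [← h1]
      constructor <;> intro hh <;> push_cast at * <;> omega

theorem core (xs : List String) :
    classify_trade_pattern [("exit_sequence", xs)] = classify_trade_pattern_alt [("exit_sequence", xs)] := by
  have hseq : pvExitSeq [("exit_sequence", xs)] = xs := by simp [pvExitSeq, List.lookup]
  simp only [classify_trade_pattern, classify_trade_pattern_alt, hseq]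
  have hge : ∀ k : Nat, ((k : Int) < lastSlAux xs 0 (-1)) ↔
      (∃ x ∈ List.drop (k+1) xs, pvHas "sl" x = true) := by
    intro k
    have h := lastSlAux_ge_iff xs (k+1) 0 (-1) (by norm_num)
    push_cast at h
    rw [List.any_eq_true] at h
    constructor
    · intro hlt; exact h.mp (by omega)
    · intro hx; have := h.mpr hx; omega
  have hsl : (lastSlAux xs 0 (-1) ≥ 0) ↔ xs.any (pvHas "sl") = true := by
    have h := lastSlAux_ge_iff xs 0 0 (-1) (by norm_num)
    simpa using h
  rw [fold_snd xs 0 (none, none, -1), fold_fst xs 0 (none, none, -1),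
      fold_thd xs 0 (none, none, -1)]
  by_cases h2 : xs.any (pvHas "t2") = true <;>
  by_cases h1 : xs.any (pvHas "t1") = true <;>
  by_cases hs : xs.any (pvHas "sl") = true <;>
  simp [h2, h1, hs, hge, hsl]

-- ===== VERDICT (by name: the statement is the Claim_ definition above) =====
theorem classify_trade_pattern_spec : Claim_equal_classify_trade_pattern := by
  intro trade _ _
  unfold Spec_classify_trade_pattern
  have h := core (pvExitSeq trade)
  simpa [classify_trade_pattern, classify_trade_pattern_alt, pvExitSeq] using h
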